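-- pv_equiv track=rewrite | github.com/SwathiBalasubramanyam/dsapython | minimal_pairs.py | minimalOperations
-- ===== SOURCE A (Python) =====
-- def minimalOperations(words):
--     # Write your code here
--
--     res_arr = []
--     for word in words:
--
--         last_char = word[0]
--         changes = 0
--         idx = 1
--
--         while idx < len(word):
--             if word[idx] == last_char:
--                 changes += 1
--                 while idx < len(word) and word[idx] == last_char:
--                     idx += 1
--             else:
--                 last_char = word[idx]
--                 idx += 1
--
--         res_arr.append(changes)
--
--     return res_arr
-- ===== SOURCE B (Python) =====
-- def minimalOperations(words):
--     # A run of equal characters of length L contributes L-1 adjacent-equal pairs and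
--     # max(L-2, 0) adjacent-equal triples, so pairs - triples counts exactly the runs
--     # of length >= 2 (the groups needing one change each).
--     res_arr = []
--     for word in words:
--         pairs = sum(a == b for a, b in zip(word, word[1:]))
--         triples = sum(a == b == c for a, b, c in zip(word, word[1:], word[2:]))
--         res_arr.append(pairs - triples)
--     return res_arr
-- ===== Notes on version B (the rewrite author's own statement) =====
-- stated objective: alternative
-- what changed: Replaces A's stateful nested-while run-skipping scan by an inclusion-exclusion closed form: per word, count adjacent-equal pairs minus adjacent-equal triples (zip with the two shifted copies), which equals the number of maximal runs of length >= 2.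
import Mathlib
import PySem

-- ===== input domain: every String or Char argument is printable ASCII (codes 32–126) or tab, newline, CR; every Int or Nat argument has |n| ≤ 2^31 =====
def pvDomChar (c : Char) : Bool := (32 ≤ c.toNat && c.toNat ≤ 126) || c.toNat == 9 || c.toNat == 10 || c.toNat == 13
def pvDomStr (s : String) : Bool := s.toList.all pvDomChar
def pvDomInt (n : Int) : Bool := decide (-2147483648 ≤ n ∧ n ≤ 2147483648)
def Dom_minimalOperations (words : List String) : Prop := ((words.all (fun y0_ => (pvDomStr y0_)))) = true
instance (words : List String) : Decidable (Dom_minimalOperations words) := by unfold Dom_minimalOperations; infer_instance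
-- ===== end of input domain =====

-- B replaces A's stateful nested-while run-skipping scan by an inclusion-exclusion
-- closed form (adjacent-equal pairs minus adjacent-equal triples); objective: alternative.

-- ===== PORT A =====

-- inner while: 'while idx < len(word) and word[idx] == last_char: idx += 1',
-- expressed on the suffix of the word starting at idx
def pvSkip (last : Char) : List Char → List Char
  | [] => []
  | c :: rest => if c = last then pvSkip last rest else c :: rest

theorem pvSkip_length_le (last : Char) (l : List Char) : (pvSkip last l).length ≤ l.length := by
  induction l with
  | nil => simp [pvSkip]
  | cons c rest ih =>
    simp only [pvSkip]
    split
    · exact le_trans ih (Nat.le_succ _)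
    · simp

-- outer while over the suffix starting at idx, carrying last_char; in the equal branch
-- the inner while skips the current char (equal to last_char) and then the rest
def pvLoopA (last : Char) : List Char → Int
  | [] => 0
  | c :: rest =>
    if c = last then 1 + pvLoopA last (pvSkip last rest)
    else pvLoopA c rest
termination_by l => l.length
decreasing_by
  · exact Nat.lt_succ_of_le (pvSkip_length_le _ _)
  · simp

def minimalOperations (words : List String) : List Int :=
  words.map (fun w =>
    match w.toList with
    | [] => 0            -- word[0] raises IndexError in Python here; excluded by Pre_
    | c :: rest => pvLoopA c rest)

-- ===== PORT B =====

-- pairs = sum(a == b for a, b in zip(word, word[1:]));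
-- triples = sum(a == b == c for a, b, c in zip(word, word[1:], word[2:])); pairs - triples
def minimalOperations_alt (words : List String) : List Int :=
  words.map (fun w =>
    (((w.toList.zip w.toList.tail).countP (fun p => p.1 == p.2) : Int))
      - (((w.toList.zip (w.toList.tail.zip w.toList.tail.tail)).countP
            (fun p => p.1 == p.2.1 && p.2.1 == p.2.2) : Int)))

-- ===== PRECONDITION & SPEC =====
-- Pre_ excludes lists containing an empty word: there A raises IndexError (word[0]).
def Pre_minimalOperations (words : List String) : Prop := ∀ w ∈ words, w ≠ ""
instance (words : List String) : Decidable (Pre_minimalOperations words) := by unfold Pre_minimalOperations; infer_instance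
def pvWitness_minimalOperations : List String := (["aab", "x", "oddddo"])

def Spec_minimalOperations (words : List String) (out : List Int) : Prop := out = minimalOperations_alt words
instance (words : List String) (out : List Int) : Decidable (Spec_minimalOperations words out) := by unfold Spec_minimalOperations; infer_instance

-- ===== CLAIM (what is proved, stated in full; the proofs are below) =====
def Claim_equal_minimalOperations : Prop := ∀ (words : List String), Dom_minimalOperations words → Pre_minimalOperations words → Spec_minimalOperations words (minimalOperations words)

-- ===== LEMMAS AND PROOFS =====

-- recursive characterisations of the two zip-counts of B
def pairsN : List Char → Nat
  | a :: b :: rest => (if a = b then 1 else 0) + pairsN (b :: rest)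
  | _ => 0

def triplesN : List Char → Nat
  | a :: b :: c :: rest => (if a = b ∧ b = c then 1 else 0) + triplesN (b :: c :: rest)
  | _ => 0

theorem countP_zip_pairs (l : List Char) :
    (l.zip l.tail).countP (fun p => p.1 == p.2) = pairsN l := by
  match l with
  | [] => rfl
  | [a] => rfl
  | a :: b :: rest =>
    have ih := countP_zip_pairs (b :: rest)
    simp only [List.tail, List.zip_cons_cons, List.countP_cons, pairsN] at *
    rw [ih]
    by_cases h : a = b <;> simp [h]
    omega

theorem countP_zip_triples (l : List Char) :
    (l.zip (l.tail.zip l.tail.tail)).countP (fun p => p.1 == p.2.1 && p.2.1 == p.2.2)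
      = triplesN l := by
  match l with
  | [] => rfl
  | [a] => rfl
  | [a, b] => rfl
  | a :: b :: c :: rest =>
    have ih := countP_zip_triples (b :: c :: rest)
    simp only [List.tail, List.zip_cons_cons, List.countP_cons, triplesN] at *
    rw [ih]
    by_cases h1 : a = b <;> by_cases h2 : b = c <;> simp [h1, h2, Nat.add_comm]

-- skipping the equal prefix inside a run changes pairs - triples by exactly 1
theorem skip_pairs_triples (p : Char) (rest : List Char) :
    (pairsN (p :: p :: rest) : Int) - triplesN (p :: p :: rest)
      = 1 + ((pairsN (p :: pvSkip p rest) : Int) - triplesN (p :: pvSkip p rest)) := by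
  induction rest with
  | nil => simp [pairsN, triplesN, pvSkip]
  | cons d rest' ih =>
    by_cases h : d = p
    · subst h
      have e1 : pairsN (d :: d :: d :: rest') = 1 + pairsN (d :: d :: rest') := by
        simp [pairsN]
      have e2 : triplesN (d :: d :: d :: rest') = 1 + triplesN (d :: d :: rest') := by
        simp [triplesN]
      simp only [pvSkip]
      push_cast [e1, e2]
      omega
    · have e1 : pairsN (p :: p :: d :: rest') = 1 + pairsN (p :: d :: rest') := by
        simp [pairsN]
      have hpd : p ≠ d := fun hh => h hh.symm
      have e2 : triplesN (p :: p :: d :: rest') = triplesN (p :: d :: rest') := by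
        simp [triplesN, hpd]
      simp only [pvSkip, if_neg h]
      push_cast [e1, e2]
      omega

-- main loop equivalence: A's nested-while count equals B's pairs - triples
theorem pvLoopA_eq (l : List Char) (last : Char) :
    pvLoopA last l = (pairsN (last :: l) : Int) - triplesN (last :: l) := by
  induction hn : l.length using Nat.strong_induction_on generalizing l last with
  | _ n ih =>
  match l with
  | [] => simp [pvLoopA, pairsN, triplesN]
  | c :: rest =>
    by_cases h : c = last
    · subst h
      have hlen : (pvSkip c rest).length < n := by
        subst hn; exact Nat.lt_succ_of_le (pvSkip_length_le _ _)
      rw [skip_pairs_triples, ← ih _ hlen (pvSkip c rest) c rfl]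
      simp [pvLoopA]
    · have hlen : rest.length < n := by subst hn; simp
      have hlc : last ≠ c := fun hh => h hh.symm
      have e1 : pairsN (last :: c :: rest) = pairsN (c :: rest) := by
        simp [pairsN, hlc]
      have e2 : triplesN (last :: c :: rest) = triplesN (c :: rest) := by
        match rest with
        | [] => simp [triplesN]
        | d :: rest' => simp [triplesN, hlc]
      simp only [pvLoopA, if_neg h]
      rw [ih _ hlen rest c rfl, e1, e2]

-- ===== VERDICT (by name: the statement is the Claim_ definition above) =====
theorem minimalOperations_spec : Claim_equal_minimalOperations := by
  intro words _ _
  unfold Spec_minimalOperations minimalOperations minimalOperations_alt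
  refine List.map_congr_left (fun w _ => ?_)
  rw [countP_zip_pairs, countP_zip_triples]
  match h : w.toList with
  | [] => rfl
  | c :: rest => exact pvLoopA_eq rest c
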